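-- pv_equiv track=rewrite | github.com/alopez-180/CursoPyhton_Desde_0 | Ejercicios_PracticarLogica/23_EncriptacionKaraca.py | encriptator2
-- ===== SOURCE A (Python) =====
-- def encriptator2(str1):
--     alreves = ""
--     for i in str1:
--         alreves = i + alreves
--
--     cadenall = ""
--
--     for i in alreves:
--         if i == "0":
--             i = "·"
--             cadenall = cadenall + i
--         elif i == "1":
--             i = "ª"
--             cadenall = cadenall + i
--         elif i == "2":
--             i = "º"
--             cadenall = cadenall + i
--         elif i == "3":
--             i = "|"
--             cadenall = cadenall + i
--         elif i == "4":
--             i = "¬"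
--             cadenall = cadenall + i
--         else:
--             cadenall = cadenall + i
--
--     cadena2 = ""
--
--     for i in cadenall:
--         if i == "a":
--             i = "0"
--             cadena2 = cadena2 + i
--         elif i == "e":
--             i = "1"
--             cadena2 = cadena2 + i
--         elif i == "i":
--             i = "2"
--             cadena2 = cadena2 + i
--         elif i == "o":
--             i = "3"
--             cadena2 = cadena2 + i
--         elif i == "u":
--             i = "4"
--             cadena2 = cadena2 + i
--         else:
--             cadena2 = cadena2 + i
--
--     cadena2 = cadena2 + "aca"
--     return cadena2
-- ===== SOURCE B (Python) =====
-- _TABLE = str.maketrans({'0': '\u00b7', '1': '\u00aa', '2': '\u00ba', '3': '|', '4': '\u00ac',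
--                         'a': '0', 'e': '1', 'i': '2', 'o': '3', 'u': '4'})
--
-- def encriptator2(str1):
--     return str1[::-1].translate(_TABLE) + "aca"
-- ===== Notes on version B (the rewrite author's own statement) =====
-- stated objective: faster
-- what changed: Replaces the manual prepend-reversal loop and two sequential if/elif substitution passes (each quadratic from repeated string concatenation) with a slice reversal and a single table-driven str.translate pass (the two key sets are disjoint, so merging the passes is exact).
import Mathlib
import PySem

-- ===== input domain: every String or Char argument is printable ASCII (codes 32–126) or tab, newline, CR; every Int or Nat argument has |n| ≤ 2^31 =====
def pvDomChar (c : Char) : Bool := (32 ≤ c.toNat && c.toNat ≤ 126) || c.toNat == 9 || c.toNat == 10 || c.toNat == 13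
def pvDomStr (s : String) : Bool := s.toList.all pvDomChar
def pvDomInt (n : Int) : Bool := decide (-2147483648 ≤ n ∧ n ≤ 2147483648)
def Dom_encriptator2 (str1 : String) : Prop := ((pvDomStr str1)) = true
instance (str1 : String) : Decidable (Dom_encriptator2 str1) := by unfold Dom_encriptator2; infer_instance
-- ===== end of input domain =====

-- B replaces A's manual reversal loop and two sequential if/elif substitution passes
-- with a slice reversal and one table-driven translation pass (idiomatic, single pass).

-- ===== PORT A =====
def encriptator2 (str1 : String) : String :=
  let alreves := str1.toList.foldl (fun acc c => c :: acc) []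
  let cadenall := alreves.foldl (fun acc c =>
    if c = '0' then acc ++ ['·']
    else if c = '1' then acc ++ ['ª']
    else if c = '2' then acc ++ ['º']
    else if c = '3' then acc ++ ['|']
    else if c = '4' then acc ++ ['¬']
    else acc ++ [c]) []
  let cadena2 := cadenall.foldl (fun acc c =>
    if c = 'a' then acc ++ ['0']
    else if c = 'e' then acc ++ ['1']
    else if c = 'i' then acc ++ ['2']
    else if c = 'o' then acc ++ ['3']
    else if c = 'u' then acc ++ ['4']
    else acc ++ [c]) []
  (cadena2 ++ "aca".toList).asString

-- ===== PORT B =====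
def pvTable : List (Char × Char) :=
  [('0','·'),('1','ª'),('2','º'),('3','|'),('4','¬'),
   ('a','0'),('e','1'),('i','2'),('o','3'),('u','4')]

def pvTr (c : Char) : Char :=
  ((pvTable.find? (fun p => p.1 == c)).map Prod.snd).getD c

def encriptator2_alt (str1 : String) : String :=
  (str1.toList.reverse.map pvTr).asString ++ "aca"

-- ===== PRECONDITION & SPEC =====
def Spec_encriptator2 (str1 : String) (out : String) : Prop := out = encriptator2_alt str1
instance (str1 : String) (out : String) : Decidable (Spec_encriptator2 str1 out) := by unfold Spec_encriptator2; infer_instance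

-- ===== CLAIM (what is proved, stated in full; the proofs are below) =====
def Claim_equal_encriptator2 : Prop := ∀ (str1 : String), Dom_encriptator2 str1 → Spec_encriptator2 str1 (encriptator2 str1)

-- ===== LEMMAS AND PROOFS =====

theorem pv_foldl_cons (l acc : List Char) :
    l.foldl (fun acc c => c :: acc) acc = l.reverse ++ acc := by
  induction l generalizing acc with
  | nil => simp
  | cons x xs ih => simp [List.foldl_cons, ih]

def pvG2 (c : Char) : Char :=
  if c = '0' then '·' else if c = '1' then 'ª' else if c = '2' then 'º'
  else if c = '3' then '|' else if c = '4' then '¬' else c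

def pvG3 (c : Char) : Char :=
  if c = 'a' then '0' else if c = 'e' then '1' else if c = 'i' then '2'
  else if c = 'o' then '3' else if c = 'u' then '4' else c

theorem pv_pass2 (l acc : List Char) :
    l.foldl (fun acc c =>
      if c = '0' then acc ++ ['·']
      else if c = '1' then acc ++ ['ª']
      else if c = '2' then acc ++ ['º']
      else if c = '3' then acc ++ ['|']
      else if c = '4' then acc ++ ['¬']
      else acc ++ [c]) acc = acc ++ l.map pvG2 := by
  induction l generalizing acc with
  | nil => simp
  | cons x xs ih =>
    simp only [List.foldl_cons, List.map_cons, pvG2]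
    split_ifs <;> simp [ih]

theorem pv_pass3 (l acc : List Char) :
    l.foldl (fun acc c =>
      if c = 'a' then acc ++ ['0']
      else if c = 'e' then acc ++ ['1']
      else if c = 'i' then acc ++ ['2']
      else if c = 'o' then acc ++ ['3']
      else if c = 'u' then acc ++ ['4']
      else acc ++ [c]) acc = acc ++ l.map pvG3 := by
  induction l generalizing acc with
  | nil => simp
  | cons x xs ih =>
    simp only [List.foldl_cons, List.map_cons, pvG3]
    split_ifs <;> simp [ih]

theorem pv_tr_eq (c : Char) : pvG3 (pvG2 c) = pvTr c := by
  simp only [pvG2, pvG3, pvTr]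
  split_ifs <;> (try subst_eqs) <;>
    first
      | rfl
      | (rw [List.find?_eq_none.mpr (by
            intro x hx; fin_cases hx <;>
              exact fun hb => absurd (eq_comm.mp (beq_iff_eq.mp hb)) (by assumption))]
         rfl)

-- ===== VERDICT (by name: the statement is the Claim_ definition above) =====
theorem encriptator2_spec : Claim_equal_encriptator2 := by
  intro str1 _
  unfold Spec_encriptator2 encriptator2 encriptator2_alt
  simp only [pv_foldl_cons, pv_pass2, pv_pass3, List.append_nil, List.nil_append,
    List.map_map]
  have : (str1.toList.reverse.map pvG2).map pvG3 = str1.toList.reverse.map pvTr := by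
    simp [List.map_map, Function.comp, pv_tr_eq]
  rw [List.map_map] at this
  rw [this]
  apply String.ext
  simp [List.asString]
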